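-- pv_equiv track=rewrite | github.com/SkyClad-Observer/ADAPT | CoqDev/build/build_proj.py | filter_errors_only
-- ===== SOURCE A (Python) =====
-- def filter_errors_only(log_text: str) -> str:
--     lines = log_text.splitlines(keepends=True)
--     output_lines = []
--
--     # We'll track whether we are currently "inside" an error block or a warning block.
--     in_error_block = False
--     in_warning_block = False
--
--     for line in lines:
--         # Check if a new block starts
--         if line.startswith("Error:"):
--             # Switch to error-block mode
--             in_error_block = True
--             in_warning_block = False
--             output_lines.append(line)  # Keep the "Error: ..." line itself
--
--         elif line.startswith("Warning:"):
--             # Switch to warning-block mode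
--             in_error_block = False
--             in_warning_block = True
--         else:
--             if in_error_block:
--                 output_lines.append(line)
--             elif not in_warning_block:
--                 output_lines.append(line)
--
--     return "".join(output_lines)
-- ===== SOURCE B (Python) =====
-- def filter_errors_only(log_text: str) -> str:
--     # Phase 1: segment the lines into (keep_flag, lines) blocks.
--     blocks = [(True, [])]
--     for line in log_text.splitlines(keepends=True):
--         if line.startswith("Error:"):
--             blocks.append((True, [line]))
--         elif line.startswith("Warning:"):
--             blocks.append((False, []))
--         else:
--             blocks[-1][1].append(line)
--     # Phase 2: emit the lines of the kept blocks.
--     return "".join(line for keep, lines in blocks if keep for line in lines)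
-- ===== Notes on version B (the rewrite author's own statement) =====
-- stated objective: alternative
-- what changed: B replaces A's inline two-flag (in_error/in_warning) state machine with a two-phase pass: first segment the lines into typed (keep_flag, lines) blocks, then concatenate the lines of the kept blocks.
import Mathlib
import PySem

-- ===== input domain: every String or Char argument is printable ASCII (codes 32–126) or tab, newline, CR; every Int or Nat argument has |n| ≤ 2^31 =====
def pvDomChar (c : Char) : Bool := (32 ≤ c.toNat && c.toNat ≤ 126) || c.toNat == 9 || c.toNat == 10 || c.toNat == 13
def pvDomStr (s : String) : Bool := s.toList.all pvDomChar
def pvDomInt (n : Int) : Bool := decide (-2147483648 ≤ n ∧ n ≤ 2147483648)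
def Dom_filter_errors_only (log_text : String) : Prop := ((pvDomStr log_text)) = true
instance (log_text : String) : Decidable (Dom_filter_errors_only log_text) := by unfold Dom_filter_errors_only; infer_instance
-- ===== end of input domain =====

-- B separates segmentation into keep/drop blocks from emission, instead of A's inline
-- two-flag state machine; same cost, different decomposition (objective: alternative).

-- str.splitlines(keepends=True), ported by hand (PySem has only the keepends=False form):
-- exact on the ASCII domain, where the only line breaks are '\n', '\r' and '\r\n'.
-- Shared by both ports (both Pythons call the same builtin on the same argument).
def pvSplitKeep (acc : List Char) (s : List Char) : List (List Char) :=
  match s with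
  | [] => if acc = [] then [] else [acc.reverse]
  | c :: rest =>
    if c = '\n' then (acc.reverse ++ [c]) :: pvSplitKeep [] rest
    else if c = '\r' then
      if rest.head? = some '\n' then (acc.reverse ++ ['\r', '\n']) :: pvSplitKeep [] rest.tail
      else (acc.reverse ++ [c]) :: pvSplitKeep [] rest
    else pvSplitKeep (c :: acc) rest
termination_by s.length
decreasing_by all_goals (simp [List.length_tail]; try omega)

-- ===== PORT A =====
-- A's loop: flags in_error_block / in_warning_block, output_lines accumulated (reversed).
def feLoopA : List (List Char) → Bool → Bool → List (List Char) → List (List Char)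
  | [], _, _, out => out.reverse
  | l :: rest, inE, inW, out =>
    if PySem.Chars.startswith l "Error:".toList then
      feLoopA rest true false (l :: out)
    else if PySem.Chars.startswith l "Warning:".toList then
      feLoopA rest false true out
    else
      if inE then feLoopA rest inE inW (l :: out)
      else if !inW then feLoopA rest inE inW (l :: out)
      else feLoopA rest inE inW out

def filter_errors_only (log_text : String) : String :=
  String.ofList (PySem.Chars.join [] (feLoopA (pvSplitKeep [] log_text.toList) false false []))

-- ===== PORT B =====
-- B phase 1: segment the lines into blocks (keep_flag, lines); the current block's lines
-- are held reversed in `cur` (Python appends to blocks[-1]).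
def feSegB : List (List Char) → Bool → List (List Char) → List (Bool × List (List Char))
  | [], keep, cur => [(keep, cur.reverse)]
  | l :: rest, keep, cur =>
    if PySem.Chars.startswith l "Error:".toList then
      (keep, cur.reverse) :: feSegB rest true [l]
    else if PySem.Chars.startswith l "Warning:".toList then
      (keep, cur.reverse) :: feSegB rest false []
    else
      feSegB rest keep (l :: cur)

def feEmitB (blocks : List (Bool × List (List Char))) : List Char :=
  PySem.Chars.join [] ((blocks.filter (fun b => b.1)).flatMap (fun b => b.2))


def filter_errors_only_alt (log_text : String) : String :=
  String.ofList (feEmitB (feSegB (pvSplitKeep [] log_text.toList) true []))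

-- ===== PRECONDITION & SPEC =====
def Spec_filter_errors_only (log_text : String) (out : String) : Prop := out = filter_errors_only_alt log_text
instance (log_text : String) (out : String) : Decidable (Spec_filter_errors_only log_text out) := by unfold Spec_filter_errors_only; infer_instance

-- ===== CLAIM (what is proved, stated in full; the proofs are below) =====
def Claim_equal_filter_errors_only : Prop := ∀ (log_text : String), Dom_filter_errors_only log_text → Spec_filter_errors_only log_text (filter_errors_only log_text)

-- ===== LEMMAS AND PROOFS =====

theorem pvJoinAll (l : List (List Char)) : PySem.Chars.join [] l = l.flatten := by
  induction l with
  | nil => simp [PySem.Chars.join_nil]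
  | cons x xs ih =>
    cases xs with
    | nil => simp [PySem.Chars.join_singleton]
    | cons y ys => rw [PySem.Chars.join_cons_cons]; simp_all

theorem feEmitB_nil : feEmitB [] = [] := by simp [feEmitB, PySem.Chars.join_nil]

theorem feEmitB_cons (b : Bool × List (List Char)) (bs : List (Bool × List (List Char))) :
    feEmitB (b :: bs) = (if b.1 then b.2.flatten else []) ++ feEmitB bs := by
  obtain ⟨k, ls⟩ := b
  cases k <;> simp [feEmitB, pvJoinAll]

theorem feLoopA_acc (ls : List (List Char)) :
    ∀ (inE inW : Bool) (out : List (List Char)),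
      feLoopA ls inE inW out = out.reverse ++ feLoopA ls inE inW [] := by
  induction ls with
  | nil => intro inE inW out; simp [feLoopA]
  | cons l rest ih =>
    intro inE inW out
    simp only [feLoopA]
    split_ifs <;> first
      | (rw [ih _ _ (l :: out), ih _ _ [l]]; simp)
      | exact ih _ _ out

theorem feSegB_cur (ls : List (List Char)) :
    ∀ (keep : Bool) (cur : List (List Char)),
      feEmitB (feSegB ls keep cur)
        = (if keep then cur.reverse.flatten else []) ++ feEmitB (feSegB ls keep []) := by
  induction ls with
  | nil =>
    intro keep cur
    simp only [feSegB]
    rw [feEmitB_cons, feEmitB_cons]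
    cases keep <;> simp [feEmitB_nil]
  | cons l rest ih =>
    intro keep cur
    simp only [feSegB]
    by_cases h1 : PySem.Chars.startswith l "Error:".toList = true
    · simp only [h1, if_true]
      rw [feEmitB_cons, feEmitB_cons]
      cases keep <;> simp
    · by_cases h2 : PySem.Chars.startswith l "Warning:".toList = true
      · simp only [h1, h2, if_true, Bool.false_eq_true, if_false]
        rw [feEmitB_cons, feEmitB_cons]
        cases keep <;> simp
      · simp only [h1, h2, Bool.false_eq_true, if_false]
        rw [ih keep (l :: cur), ih keep [l]]
        cases keep <;> simp

theorem feMain (ls : List (List Char)) :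
    ∀ (inE inW : Bool), (inW = true → inE = false) →
      PySem.Chars.join [] (feLoopA ls inE inW []) = feEmitB (feSegB ls (!inW) []) := by
  induction ls with
  | nil =>
    intro inE inW _
    simp only [feLoopA, feSegB, List.reverse_nil]
    rw [feEmitB_cons, feEmitB_nil, PySem.Chars.join_nil]
    cases inW <;> simp
  | cons l rest ih =>
    intro inE inW h
    simp only [feLoopA, feSegB]
    by_cases h1 : PySem.Chars.startswith l "Error:".toList = true
    · have hI := ih true false (by simp)
      simp only [Bool.not_false] at hI
      rw [pvJoinAll] at hI
      simp only [h1, if_true]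
      rw [feLoopA_acc rest true false [l], feEmitB_cons, feSegB_cur rest true [l], pvJoinAll]
      cases inW <;> simp [hI]
    · by_cases h2 : PySem.Chars.startswith l "Warning:".toList = true
      · have hI := ih false true (fun _ => rfl)
        simp only [Bool.not_true] at hI
        simp only [h1, h2, if_true, Bool.false_eq_true, if_false]
        rw [feEmitB_cons]
        cases inW <;> simp [hI]
      · simp only [h1, h2, Bool.false_eq_true, if_false]
        cases inW with
        | false =>
          have hI := ih inE false (by simp)
          simp only [Bool.not_false] at hI
          rw [pvJoinAll] at hI
          simp only [Bool.not_false, if_true, ite_self]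
          rw [feSegB_cur rest true [l], feLoopA_acc rest inE false [l], pvJoinAll]
          simp [hI]
        | true =>
          have hE := h rfl
          subst hE
          have hI := ih false true (fun _ => rfl)
          simp only [Bool.not_true] at hI
          simp only [Bool.not_true, Bool.false_eq_true, if_false]
          rw [feSegB_cur rest false [l]]
          simp [hI]

-- ===== VERDICT (by name: the statement is the Claim_ definition above) =====
theorem filter_errors_only_spec : Claim_equal_filter_errors_only := by
  intro log_text _
  unfold Spec_filter_errors_only filter_errors_only filter_errors_only_alt
  rw [feMain (pvSplitKeep [] log_text.toList) false false (by simp)]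
  rfl
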